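-- pv_equiv track=rewrite | github.com/KajaBraz/AdventOfCode2022 | day05.py | move_one_step
-- ===== SOURCE A (Python) =====
-- def move_one_step(current_stacks, procedure, change_order=True):
--     current_stacks_copy = [[item for item in row] for row in current_stacks]
--     items_num, stack_from, stack_to = procedure
--     items = current_stacks_copy[stack_from - 1][len(current_stacks_copy[stack_from - 1]) - items_num:]
--     current_stacks_copy[stack_to - 1] = current_stacks_copy[stack_to - 1] + items[::-1] if change_order else \
--         current_stacks_copy[stack_to - 1] + items
--     current_stacks_copy[stack_from - 1] = current_stacks_copy[stack_from - 1][
--                                           :len(current_stacks_copy[stack_from - 1]) - items_num]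
--     return current_stacks_copy
-- ===== SOURCE B (Python) =====
-- def move_one_step(current_stacks, procedure, change_order=True):
--     stacks = [list(row) for row in current_stacks]
--     items_num, stack_from, stack_to = procedure
--     if change_order:
--         # one-at-a-time transfer reverses the moved block
--         for _ in range(items_num):
--             crate = stacks[stack_from - 1].pop()
--             stacks[stack_to - 1].append(crate)
--     else:
--         popped = [stacks[stack_from - 1].pop() for _ in range(items_num)]
--         stacks[stack_to - 1].extend(reversed(popped))
--     return stacks
-- ===== Notes on version B (the rewrite author's own statement) =====
-- stated objective: idiomatic
-- what changed: B replaces A's negative-slice arithmetic and two whole-row reassignments by the direct crate-moving loop: it pops the top crate off the source stack items_num times, appending each to the destination (one-at-a-time transfer reverses the block exactly like A's items[::-1]); when change_order is False it collects the popped crates and extends the destination with them in reversed pop order.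
-- outside the precondition, e.g. on move_one_step([['a', 'b'], []], (3, 1, 2), True): A returns [['a'], ['b']], B raises IndexError
import Mathlib
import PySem

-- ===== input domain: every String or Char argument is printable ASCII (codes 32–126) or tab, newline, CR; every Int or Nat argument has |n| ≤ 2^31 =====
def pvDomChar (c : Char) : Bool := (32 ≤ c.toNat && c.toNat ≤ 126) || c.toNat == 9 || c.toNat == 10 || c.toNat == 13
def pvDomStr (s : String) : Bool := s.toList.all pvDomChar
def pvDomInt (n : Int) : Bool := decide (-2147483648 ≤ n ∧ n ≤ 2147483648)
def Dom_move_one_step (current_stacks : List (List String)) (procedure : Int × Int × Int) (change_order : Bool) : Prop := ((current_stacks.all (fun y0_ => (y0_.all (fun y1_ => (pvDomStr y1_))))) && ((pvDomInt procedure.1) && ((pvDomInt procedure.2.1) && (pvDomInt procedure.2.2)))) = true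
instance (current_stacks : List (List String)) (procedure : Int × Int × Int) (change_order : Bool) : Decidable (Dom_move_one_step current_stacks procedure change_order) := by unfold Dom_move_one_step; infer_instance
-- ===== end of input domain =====

-- ===== PORT A =====
-- B moves the crates one at a time with an explicit pop/append loop instead of A's slice
-- arithmetic (objective: idiomatic); equal on Pre_ (valid stack numbers, items_num ≤ source size).
def move_one_step (current_stacks : List (List String)) (procedure : Int × Int × Int) (change_order : Bool) : List (List String) :=
  let copy := current_stacks.map (fun row => row.map (fun item => item))
  let items_num := procedure.1
  let stack_from := procedure.2.1
  let stack_to := procedure.2.2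
  let srcRow := PySem.List.pyGetD copy (stack_from - 1) []
  let items := PySem.List.slice srcRow (some ((srcRow.length : Int) - items_num)) none
  -- items[::-1] is items.reverse (PySem.List.slice?_none_none_neg_one)
  let copy1 := PySem.List.pySetD copy (stack_to - 1)
    (if change_order then (PySem.List.pyGetD copy (stack_to - 1) []) ++ items.reverse
     else (PySem.List.pyGetD copy (stack_to - 1) []) ++ items)
  let srcRow2 := PySem.List.pyGetD copy1 (stack_from - 1) []
  PySem.List.pySetD copy1 (stack_from - 1)
    (PySem.List.slice srcRow2 none (some ((srcRow2.length : Int) - items_num)))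

-- ===== PORT B =====
-- stacks[i].pop(): returns (stacks with row i's last item removed, that item)
def pvPop (sts : List (List String)) (i : Int) : List (List String) × String :=
  let src := PySem.List.pyGetD sts i []
  (PySem.List.pySetD sts i src.dropLast, src.getLast?.getD "")

def move_one_step_alt (current_stacks : List (List String)) (procedure : Int × Int × Int) (change_order : Bool) : List (List String) :=
  let sts := current_stacks.map (fun row => row.map (fun item => item))
  let items_num := procedure.1
  let stack_from := procedure.2.1
  let stack_to := procedure.2.2
  if change_order then
    (PySem.List.pyRange 0 items_num).foldl
      (fun st _ =>
        let p := pvPop st (stack_from - 1)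
        let dest := PySem.List.pyGetD p.1 (stack_to - 1) []
        PySem.List.pySetD p.1 (stack_to - 1) (dest ++ [p.2])) sts
  else
    let r := (PySem.List.pyRange 0 items_num).foldl
      (fun (s : List (List String) × List String) _ =>
        let p := pvPop s.1 (stack_from - 1)
        (p.1, s.2 ++ [p.2])) (sts, ([] : List String))
    let dest := PySem.List.pyGetD r.1 (stack_to - 1) []
    PySem.List.pySetD r.1 (stack_to - 1) (dest ++ r.2.reverse)

-- ===== PRECONDITION & SPEC =====
-- Pre_ excludes out-of-range stack numbers (A raises IndexError) and items_num larger than the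
-- source stack, where A's negative slice start silently moves only a partial block while B's
-- pop loop raises IndexError.
def Pre_move_one_step (current_stacks : List (List String)) (procedure : Int × Int × Int) (change_order : Bool) : Prop :=
  PySem.Raise.InRange current_stacks.length (procedure.2.1 - 1) ∧
  PySem.Raise.InRange current_stacks.length (procedure.2.2 - 1) ∧
  procedure.1 ≤ ((PySem.List.pyGetD current_stacks (procedure.2.1 - 1) []).length : Int)
instance (current_stacks : List (List String)) (procedure : Int × Int × Int) (change_order : Bool) : Decidable (Pre_move_one_step current_stacks procedure change_order) := by unfold Pre_move_one_step; infer_instance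

def pvWitness_move_one_step : List (List String) × (Int × Int × Int) × Bool := ([["a", "b"], []], (1, 1, 2), true)

def Spec_move_one_step (current_stacks : List (List String)) (procedure : Int × Int × Int) (change_order : Bool) (out : List (List String)) : Prop := out = move_one_step_alt current_stacks procedure change_order
instance (current_stacks : List (List String)) (procedure : Int × Int × Int) (change_order : Bool) (out : List (List String)) : Decidable (Spec_move_one_step current_stacks procedure change_order out) := by unfold Spec_move_one_step; infer_instance

-- ===== CLAIM (what is proved, stated in full; the proofs are below) =====
def Claim_equal_move_one_step : Prop := ∀ (current_stacks : List (List String)) (procedure : Int × Int × Int) (change_order : Bool), Dom_move_one_step current_stacks procedure change_order → Pre_move_one_step current_stacks procedure change_order → Spec_move_one_step current_stacks procedure change_order (move_one_step current_stacks procedure change_order)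

-- ===== LEMMAS AND PROOFS =====

-- resolution of a Python index inside its range to a plain Nat index
theorem pvIdx_resolve (n : Nat) (i : Int) (h : PySem.Raise.InRange n i) :
    ∃ j : Nat, PySem.List.pyIdx? n i = some j ∧ j < n := by
  obtain ⟨h1, h2⟩ := h
  unfold PySem.List.pyIdx?
  by_cases h3 : 0 ≤ i
  · rw [if_pos h3, if_pos h2]
    exact ⟨i.toNat, rfl, by omega⟩
  · rw [if_neg h3, if_pos h1]
    exact ⟨n - (-i).toNat, rfl, by omega⟩

theorem pvGetD_idx {α : Type} (xs : List α) (i : Int) (j : Nat) (d : α)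
    (h : PySem.List.pyIdx? xs.length i = some j) :
    PySem.List.pyGetD xs i d = xs[j]?.getD d := by
  simp [PySem.List.pyGetD, PySem.List.pyGet?, h]

theorem pvSetD_idx {α : Type} (xs : List α) (i : Int) (j : Nat) (v : α)
    (h : PySem.List.pyIdx? xs.length i = some j) :
    PySem.List.pySetD xs i v = xs.set j v := by
  simp [PySem.List.pySetD, PySem.List.pySet?, h]

-- A's two slices, in terms of m = items_num.toNat
theorem pvSlice_items (src : List String) (k : Int) (h : k ≤ (src.length : Int)) :
    PySem.List.slice src (some ((src.length : Int) - k)) none = src.drop (src.length - k.toNat) := by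
  by_cases hk : 0 ≤ k
  · rw [PySem.List.slice_from _ (by omega)]
    congr 1
    omega
  · rw [PySem.List.slice_from _ (by omega)]
    rw [List.drop_of_length_le (by omega), List.drop_of_length_le (by omega)]

theorem pvSlice_rest (src : List String) (k : Int) (h : k ≤ (src.length : Int)) :
    PySem.List.slice src none (some ((src.length : Int) - k)) = src.take (src.length - k.toNat) := by
  rw [PySem.List.slice_to _ (by omega)]
  by_cases hk : 0 ≤ k
  · congr 1
    omega
  · rw [List.take_of_length_le (by omega), List.take_of_length_le (by omega)]

theorem pvLength_pyRange_zero (k : Int) : (PySem.List.pyRange 0 k).length = k.toNat := by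
  unfold PySem.List.pyRange
  simp only [if_neg (by norm_num : (1 : Int) ≠ 0)]
  split_ifs with h1 h2 <;> simp <;> omega

-- loop invariant for popping m crates off row fi while appending each to row ti (fi ≠ ti)
theorem pvLoopT (n fi ti : Nat) (f t : Int)
    (hidxf : PySem.List.pyIdx? n (f - 1) = some fi) (hidxt : PySem.List.pyIdx? n (t - 1) = some ti)
    (hfi : fi < n) (hti : ti < n) (hne : fi ≠ ti) :
    ∀ (m : Nat) (st : List (List String)), st.length = n →
      m ≤ (st[fi]?.getD []).length →
      (fun st' => let p := pvPop st' (f - 1);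
        PySem.List.pySetD p.1 (t - 1) ((PySem.List.pyGetD p.1 (t - 1) []) ++ [p.2]))^[m] st =
      (st.set ti ((st[ti]?.getD []) ++ ((st[fi]?.getD []).drop ((st[fi]?.getD []).length - m)).reverse)).set fi
        ((st[fi]?.getD []).take ((st[fi]?.getD []).length - m)) := by
  intro m
  induction m with
  | zero =>
    intro st hlen hm
    have h1 : st[fi]?.getD ([] : List String) = st[fi]'(by omega) := by
      rw [List.getElem?_eq_getElem (by omega)]; rfl
    have h2 : st[ti]?.getD ([] : List String) = st[ti]'(by omega) := by
      rw [List.getElem?_eq_getElem (by omega)]; rfl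
    simp only [Function.iterate_zero, id_eq, Nat.sub_zero, List.take_length, List.drop_length,
      List.reverse_nil, List.append_nil]
    rw [h2, List.set_getElem_self, h1, List.set_getElem_self]
  | succ m ih =>
    intro st hlen hm
    rw [Function.iterate_succ_apply']
    rw [ih st hlen (by omega)]
    have hsrc : st[fi]?.getD ([] : List String) = st[fi]'(by omega) := by
      rw [List.getElem?_eq_getElem (by omega)]; rfl
    set src := st[fi]?.getD ([] : List String) with hsrcdef
    set dest := st[ti]?.getD ([] : List String) with hdestdef
    set st1 := (st.set ti (dest ++ (src.drop (src.length - m)).reverse)).set fi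
      (src.take (src.length - m)) with hst1
    have hlen1 : st1.length = n := by simp [hst1]; omega
    simp only []
    simp only [pvPop]
    rw [pvGetD_idx st1 _ fi _ (by rw [hlen1]; exact hidxf)]
    have hgf : st1[fi]?.getD ([] : List String) = src.take (src.length - m) := by
      rw [hst1, List.getElem?_set_self (by simp; omega)]; rfl
    rw [hgf]
    rw [pvSetD_idx st1 _ fi _ (by rw [hlen1]; exact hidxf)]
    set st2 := st1.set fi ((src.take (src.length - m)).dropLast) with hst2
    have hlen2 : st2.length = n := by simp [hst2, hst1]; omega
    rw [pvGetD_idx st2 _ ti _ (by rw [hlen2]; exact hidxt)]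
    have hgt : st2[ti]?.getD ([] : List String) = dest ++ (src.drop (src.length - m)).reverse := by
      rw [hst2, hst1, List.getElem?_set_ne hne, List.getElem?_set_ne hne,
        List.getElem?_set_self (by omega)]
      rfl
    rw [hgt]
    rw [pvSetD_idx st2 _ ti _ (by rw [hlen2]; exact hidxt)]
    have hlast : (src.take (src.length - m)).getLast?.getD "" = src[src.length - (m + 1)]'(by omega) := by
      rw [List.getLast?_eq_getElem?]
      rw [List.getElem?_take_of_lt (by rw [List.length_take]; omega)]
      rw [List.length_take]
      rw [List.getElem?_eq_getElem (by omega)]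
      simp only [Option.getD_some]
      congr 1
      omega
    have hdropLast : (src.take (src.length - m)).dropLast = src.take (src.length - (m + 1)) := by
      rw [List.dropLast_eq_take, List.take_take, List.length_take]
      congr 1
      omega
    have hdrop : src.drop (src.length - (m + 1)) =
        src[src.length - (m + 1)]'(by omega) :: src.drop (src.length - m) := by
      rw [List.drop_eq_getElem_cons (by omega)]
      congr 2
      omega
    rw [hlast, hst2, hst1, hdropLast]
    apply List.ext_getElem?
    intro j
    by_cases hjt : j = ti
    · subst hjt
      rw [List.getElem?_set_self (by simp only [List.length_set, hlen]; omega)]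
      rw [List.getElem?_set_ne (by omega),
        List.getElem?_set_self (by simp only [hlen]; omega)]
      rw [hdrop]
      simp
    · rw [List.getElem?_set_ne (by omega)]
      by_cases hjf : j = fi
      · subst hjf
        rw [List.getElem?_set_self (by simp only [List.length_set, hlen]; omega),
          List.getElem?_set_self (by simp only [List.length_set, hlen]; omega)]
      · rw [List.getElem?_set_ne (by omega), List.getElem?_set_ne (by omega),
          List.getElem?_set_ne (by omega), List.getElem?_set_ne (by omega),
          List.getElem?_set_ne (by omega)]

-- loop invariant for the collect branch: pops m crates off row fi, accumulating them (any ti)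
theorem pvLoopF (n fi : Nat) (f : Int)
    (hidxf : PySem.List.pyIdx? n (f - 1) = some fi) (hfi : fi < n) :
    ∀ (m : Nat) (st : List (List String)) (acc : List String), st.length = n →
      m ≤ (st[fi]?.getD []).length →
      (fun (s : List (List String) × List String) =>
        let p := pvPop s.1 (f - 1); (p.1, s.2 ++ [p.2]))^[m] (st, acc) =
      (st.set fi ((st[fi]?.getD []).take ((st[fi]?.getD []).length - m)),
       acc ++ ((st[fi]?.getD []).drop ((st[fi]?.getD []).length - m)).reverse) := by
  intro m
  induction m with
  | zero =>
    intro st acc hlen hm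
    have h1 : st[fi]?.getD ([] : List String) = st[fi]'(by omega) := by
      rw [List.getElem?_eq_getElem (by omega)]; rfl
    simp only [Function.iterate_zero, id_eq, Nat.sub_zero, List.take_length, List.drop_length,
      List.reverse_nil, List.append_nil]
    rw [h1, List.set_getElem_self]
  | succ m ih =>
    intro st acc hlen hm
    rw [Function.iterate_succ_apply']
    rw [ih st acc hlen (by omega)]
    set src := st[fi]?.getD ([] : List String) with hsrcdef
    set st1 := st.set fi (src.take (src.length - m)) with hst1
    have hlen1 : st1.length = n := by simp [hst1]; omega
    simp only []
    simp only [pvPop]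
    rw [pvGetD_idx st1 _ fi _ (by rw [hlen1]; exact hidxf)]
    have hgf : st1[fi]?.getD ([] : List String) = src.take (src.length - m) := by
      rw [hst1, List.getElem?_set_self (by omega)]; rfl
    rw [hgf]
    rw [pvSetD_idx st1 _ fi _ (by rw [hlen1]; exact hidxf)]
    have hlast : (src.take (src.length - m)).getLast?.getD "" = src[src.length - (m + 1)]'(by omega) := by
      rw [List.getLast?_eq_getElem?]
      rw [List.getElem?_take_of_lt (by rw [List.length_take]; omega)]
      rw [List.length_take]
      rw [List.getElem?_eq_getElem (by omega)]
      simp only [Option.getD_some]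
      congr 1
      omega
    have hdropLast : (src.take (src.length - m)).dropLast = src.take (src.length - (m + 1)) := by
      rw [List.dropLast_eq_take, List.take_take, List.length_take]
      congr 1
      omega
    have hdrop : src.drop (src.length - (m + 1)) =
        src[src.length - (m + 1)]'(by omega) :: src.drop (src.length - m) := by
      rw [List.drop_eq_getElem_cons (by omega)]
      congr 2
      omega
    rw [hlast, hdropLast, hst1, List.set_set]
    simp only [Prod.mk.injEq]
    refine ⟨by trivial, ?_⟩
    rw [hdrop]
    simp

-- the pop-and-append step is the identity when source and destination coincide
theorem pvLoopT_self (n fi : Nat) (f t : Int)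
    (hidxf : PySem.List.pyIdx? n (f - 1) = some fi) (hidxt : PySem.List.pyIdx? n (t - 1) = some fi)
    (hfi : fi < n) :
    ∀ (m : Nat) (st : List (List String)), st.length = n →
      m ≤ (st[fi]?.getD []).length →
      (fun st' => let p := pvPop st' (f - 1);
        PySem.List.pySetD p.1 (t - 1) ((PySem.List.pyGetD p.1 (t - 1) []) ++ [p.2]))^[m] st = st := by
  intro m
  induction m with
  | zero => intro st _ _; rfl
  | succ m ih =>
    intro st hlen hm
    rw [Function.iterate_succ_apply]
    set src := st[fi]?.getD ([] : List String) with hsrcdef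
    have hne : src ≠ [] := by
      intro hcon
      rw [hcon] at hm
      simp at hm
    have hstep : (let p := pvPop st (f - 1);
        PySem.List.pySetD p.1 (t - 1) ((PySem.List.pyGetD p.1 (t - 1) []) ++ [p.2])) = st := by
      simp only [pvPop]
      rw [pvGetD_idx st _ fi _ (hlen ▸ hidxf)]
      rw [pvSetD_idx st _ fi _ (hlen ▸ hidxf)]
      have hlen2 : (st.set fi src.dropLast).length = n := by simp; omega
      rw [pvGetD_idx _ _ fi _ (hlen2 ▸ hidxt)]
      rw [List.getElem?_set_self (by omega)]
      simp only [Option.getD_some]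
      rw [pvSetD_idx _ _ fi _ (hlen2 ▸ hidxt)]
      rw [List.set_set]
      have hlast : src.getLast?.getD "" = src.getLast hne := by
        rw [List.getLast?_eq_some_getLast hne]
        rfl
      rw [← hsrcdef, hlast, List.dropLast_concat_getLast hne]
      have : src = st[fi]'(by omega) := by
        rw [hsrcdef, List.getElem?_eq_getElem (by omega)]
        rfl
      rw [this, List.set_getElem_self]
    rw [hstep]
    have hm' : m ≤ src.length := by omega
    rw [hsrcdef] at hm'
    exact ih st hlen hm' 

-- evaluation of A's port when source and destination rows differ
theorem pvA_eval (cs : List (List String)) (k f t : Int) (co : Bool) (fi ti : Nat)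
    (hidxf : PySem.List.pyIdx? cs.length (f - 1) = some fi)
    (hidxt : PySem.List.pyIdx? cs.length (t - 1) = some ti)
    (hfi : fi < cs.length) (hti : ti < cs.length) (hne : fi ≠ ti)
    (hk : k ≤ ((cs[fi]?.getD []).length : Int)) :
    move_one_step cs (k, f, t) co =
      (cs.set ti (if co then (cs[ti]?.getD []) ++
          ((cs[fi]?.getD []).drop ((cs[fi]?.getD []).length - k.toNat)).reverse
        else (cs[ti]?.getD []) ++
          (cs[fi]?.getD []).drop ((cs[fi]?.getD []).length - k.toNat))).set fi
        ((cs[fi]?.getD []).take ((cs[fi]?.getD []).length - k.toNat)) := by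
  simp only [move_one_step, List.map_id']
  rw [pvGetD_idx cs _ fi _ hidxf, pvGetD_idx cs _ ti _ hidxt, pvSlice_items _ _ hk]
  rw [pvSetD_idx cs _ ti _ hidxt]
  rw [pvGetD_idx _ _ fi _ (by rw [List.length_set]; exact hidxf)]
  rw [List.getElem?_set_ne hne.symm]
  rw [pvSlice_rest _ k hk]
  rw [pvSetD_idx _ _ fi _ (by rw [List.length_set]; exact hidxf)]

-- evaluation of A's port when source and destination coincide: nothing changes
theorem pvA_eval_self (cs : List (List String)) (k f t : Int) (co : Bool) (fi : Nat)
    (hidxf : PySem.List.pyIdx? cs.length (f - 1) = some fi)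
    (hidxt : PySem.List.pyIdx? cs.length (t - 1) = some fi)
    (hfi : fi < cs.length)
    (hk : k ≤ ((cs[fi]?.getD []).length : Int)) :
    move_one_step cs (k, f, t) co = cs := by
  simp only [move_one_step, List.map_id']
  rw [pvGetD_idx cs _ fi _ hidxf, pvGetD_idx cs _ fi _ hidxt, pvSlice_items _ _ hk]
  rw [pvSetD_idx cs _ fi _ hidxt]
  rw [pvGetD_idx _ _ fi _ (by rw [List.length_set]; exact hidxf)]
  rw [List.getElem?_set_self (by omega)]
  simp only [Option.getD_some]
  rw [pvSetD_idx _ _ fi _ (by rw [List.length_set]; exact hidxf)]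
  rw [List.set_set]
  set src := cs[fi]?.getD ([] : List String) with hsrcdef
  have hif : (if co = true then src ++ (src.drop (src.length - k.toNat)).reverse
      else src ++ src.drop (src.length - k.toNat)) =
      src ++ (if co = true then (src.drop (src.length - k.toNat)).reverse
      else src.drop (src.length - k.toNat)) := by
    cases co <;> rfl
  rw [hif]
  set X := if co = true then (src.drop (src.length - k.toNat)).reverse
    else src.drop (src.length - k.toNat) with hX
  have hXlen : X.length = k.toNat := by
    rw [hX]
    by_cases hco : co = true <;> simp [hco] <;> omega
  have hrest : PySem.List.slice (src ++ X) none (some (((src ++ X).length : Int) - k)) = src := by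
    rw [PySem.List.slice_to _ (by simp; omega)]
    by_cases hkk : 0 ≤ k
    · have : ((src ++ X).length - k).toNat = src.length := by simp [hXlen]; omega
      rw [this, List.take_left]
    · have hX0 : X = [] := by
        have : X.length = 0 := by omega
        exact List.eq_nil_of_length_eq_zero this
      rw [hX0, List.append_nil, List.take_of_length_le (by omega)]
  rw [hrest]
  have : src = cs[fi]'(by omega) := by
    rw [hsrcdef, List.getElem?_eq_getElem (by omega)]
    rfl
  rw [this, List.set_getElem_self]

-- evaluation of B's port when source and destination rows differ
theorem pvB_eval (cs : List (List String)) (k f t : Int) (co : Bool) (fi ti : Nat)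
    (hidxf : PySem.List.pyIdx? cs.length (f - 1) = some fi)
    (hidxt : PySem.List.pyIdx? cs.length (t - 1) = some ti)
    (hfi : fi < cs.length) (hti : ti < cs.length) (hne : fi ≠ ti)
    (hk : k ≤ ((cs[fi]?.getD []).length : Int)) :
    move_one_step_alt cs (k, f, t) co =
      (cs.set ti (if co then (cs[ti]?.getD []) ++
          ((cs[fi]?.getD []).drop ((cs[fi]?.getD []).length - k.toNat)).reverse
        else (cs[ti]?.getD []) ++
          (cs[fi]?.getD []).drop ((cs[fi]?.getD []).length - k.toNat))).set fi
        ((cs[fi]?.getD []).take ((cs[fi]?.getD []).length - k.toNat)) := by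
  have hm : k.toNat ≤ (cs[fi]?.getD ([] : List String)).length := by omega
  cases co with
  | true =>
    simp only [move_one_step_alt, List.map_id', if_pos]
    rw [List.foldl_const, pvLength_pyRange_zero]
    rw [pvLoopT cs.length fi ti f t hidxf hidxt hfi hti hne k.toNat cs rfl hm]
  | false =>
    simp only [move_one_step_alt, List.map_id', Bool.false_eq_true, ite_false]
    rw [List.foldl_const, pvLength_pyRange_zero]
    rw [pvLoopF cs.length fi f hidxf hfi k.toNat cs [] rfl hm]
    simp only [List.nil_append]
    rw [pvGetD_idx _ _ ti _ (by rw [List.length_set]; exact hidxt)]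
    rw [List.getElem?_set_ne hne]
    rw [pvSetD_idx _ _ ti _ (by rw [List.length_set]; exact hidxt)]
    rw [List.reverse_reverse]
    rw [List.set_comm _ _ hne.symm]

-- evaluation of B's port when source and destination coincide: nothing changes
theorem pvB_eval_self (cs : List (List String)) (k f t : Int) (co : Bool) (fi : Nat)
    (hidxf : PySem.List.pyIdx? cs.length (f - 1) = some fi)
    (hidxt : PySem.List.pyIdx? cs.length (t - 1) = some fi)
    (hfi : fi < cs.length)
    (hk : k ≤ ((cs[fi]?.getD []).length : Int)) :
    move_one_step_alt cs (k, f, t) co = cs := by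
  have hm : k.toNat ≤ (cs[fi]?.getD ([] : List String)).length := by omega
  cases co with
  | true =>
    simp only [move_one_step_alt, List.map_id', if_pos]
    rw [List.foldl_const, pvLength_pyRange_zero]
    exact pvLoopT_self cs.length fi f t hidxf hidxt hfi k.toNat cs rfl hm
  | false =>
    simp only [move_one_step_alt, List.map_id', Bool.false_eq_true, ite_false]
    rw [List.foldl_const, pvLength_pyRange_zero]
    rw [pvLoopF cs.length fi f hidxf hfi k.toNat cs [] rfl hm]
    simp only [List.nil_append]
    rw [pvGetD_idx _ _ fi _ (by rw [List.length_set]; exact hidxt)]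
    rw [List.getElem?_set_self (by omega)]
    simp only [Option.getD_some]
    rw [pvSetD_idx _ _ fi _ (by rw [List.length_set]; exact hidxt)]
    rw [List.set_set, List.reverse_reverse, List.take_append_drop]
    have : cs[fi]?.getD ([] : List String) = cs[fi]'(by omega) := by
      rw [List.getElem?_eq_getElem (by omega)]
      rfl
    rw [this, List.set_getElem_self]

-- ===== VERDICT (by name: the statement is the Claim_ definition above) =====
theorem move_one_step_spec : Claim_equal_move_one_step := by
  intro cs procedure co _ hpre
  obtain ⟨k, f, t⟩ := procedure
  obtain ⟨hin_f, hin_t, hk⟩ := hpre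
  unfold Spec_move_one_step
  obtain ⟨fi, hidxf, hfi⟩ := pvIdx_resolve cs.length (f - 1) hin_f
  obtain ⟨ti, hidxt, hti⟩ := pvIdx_resolve cs.length (t - 1) hin_t
  have hk' : k ≤ ((cs[fi]?.getD ([] : List String)).length : Int) := by
    rwa [pvGetD_idx cs _ fi _ hidxf] at hk
  by_cases hft : fi = ti
  · subst hft
    rw [pvA_eval_self cs k f t co fi hidxf hidxt hfi hk',
      pvB_eval_self cs k f t co fi hidxf hidxt hfi hk']
  · rw [pvA_eval cs k f t co fi ti hidxf hidxt hfi hti hft hk',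
      pvB_eval cs k f t co fi ti hidxf hidxt hfi hti hft hk']
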